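-- pv_equiv track=rewrite | github.com/bestwoody/tics-script | wildland/simulator/base/base.py | locate_index_in_size_list
-- ===== SOURCE A (Python) =====
-- def locate_index_in_size_list(sizes, i):
--     sum = 0
--     j = 0
--     while j < len(sizes):
--         size = sizes[j]
--         if i < sum + size:
--             break
--         sum += size
--         j += 1
--     return j, sum
-- ===== SOURCE B (Python) =====
-- def locate_index_in_size_list(sizes, i):
--     # Phase 1: precompute the cumulative-after sums of the blocks.
--     cums = []
--     t = 0
--     for s in sizes:
--         t += s
--         cums.append(t)
--     # Phase 2: first block whose cumulative-after sum strictly exceeds i.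
--     for j, (c, s) in enumerate(zip(cums, sizes)):
--         if i < c:
--             return j, c - s
--     return len(sizes), t
-- ===== Notes on version B (the rewrite author's own statement) =====
-- stated objective: alternative
-- what changed: Replaces the fused while-loop with running index/accumulator state by a two-phase approach: precompute the cumulative-after sums, then find the first cumulative value strictly exceeding i and recover the prefix sum by subtraction.
import Mathlib
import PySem

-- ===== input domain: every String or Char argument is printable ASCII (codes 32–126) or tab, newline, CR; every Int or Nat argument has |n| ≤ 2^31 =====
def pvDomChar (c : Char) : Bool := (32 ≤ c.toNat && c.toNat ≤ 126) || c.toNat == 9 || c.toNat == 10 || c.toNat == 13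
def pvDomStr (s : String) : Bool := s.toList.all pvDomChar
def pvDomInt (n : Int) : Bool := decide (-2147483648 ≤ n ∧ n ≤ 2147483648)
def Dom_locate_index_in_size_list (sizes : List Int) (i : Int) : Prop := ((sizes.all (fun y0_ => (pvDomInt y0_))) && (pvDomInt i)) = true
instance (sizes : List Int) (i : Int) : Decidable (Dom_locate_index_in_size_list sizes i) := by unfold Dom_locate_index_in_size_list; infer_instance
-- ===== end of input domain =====

-- B: two-phase alternative — precompute cumulative-after sums, then scan for the first one
-- strictly exceeding i; same O(n) cost, different structure (return value proved equal).
-- ===== PORT A =====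
-- A's while loop over index j with running sum, transcribed as structural recursion on the
-- remaining suffix of sizes (sizes[j] is the head of the suffix), carrying j and sum.
def pvLoopA (sizes : List Int) (i : Int) (j : Int) (sum : Int) : Int × Int :=
  match sizes with
  | [] => (j, sum)
  | size :: rest => if i < sum + size then (j, sum) else pvLoopA rest i (j + 1) (sum + size)

def locate_index_in_size_list (sizes : List Int) (i : Int) : Int × Int :=
  pvLoopA sizes i 0 0

-- ===== PORT B =====
-- Phase 1 of Source B: build the list of cumulative-after sums; also returns the final total t.
def pvCumsB (sizes : List Int) (t : Int) : List Int × Int :=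
  match sizes with
  | [] => ([], t)
  | s :: rest =>
    let res := pvCumsB rest (t + s)
    ((t + s) :: res.1, res.2)

-- Phase 2 of Source B: enumerate over zip(cums, sizes); first (c, s) with i < c gives (j, c - s).
def pvScanB (pairs : List (Int × Int)) (i : Int) (j : Int) (fallback : Int × Int) : Int × Int :=
  match pairs with
  | [] => fallback
  | (c, s) :: rest => if i < c then (j, c - s) else pvScanB rest i (j + 1) fallback

def locate_index_in_size_list_alt (sizes : List Int) (i : Int) : Int × Int :=
  let built := pvCumsB sizes 0
  pvScanB (built.1.zip sizes) i 0 ((sizes.length : Int), built.2)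

-- ===== PRECONDITION & SPEC =====
def Spec_locate_index_in_size_list (sizes : List Int) (i : Int) (out : Int × Int) : Prop := out = locate_index_in_size_list_alt sizes i
instance (sizes : List Int) (i : Int) (out : Int × Int) : Decidable (Spec_locate_index_in_size_list sizes i out) := by unfold Spec_locate_index_in_size_list; infer_instance

-- ===== CLAIM (what is proved, stated in full; the proofs are below) =====
def Claim_equal_locate_index_in_size_list : Prop := ∀ (sizes : List Int) (i : Int), Dom_locate_index_in_size_list sizes i → Spec_locate_index_in_size_list sizes i (locate_index_in_size_list sizes i)

-- ===== LEMMAS AND PROOFS =====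

-- ===== VERDICT (by name: the statement is the Claim_ definition above) =====
-- Loop invariant: A's loop from state (j, sum) equals B's scan over the cumulative sums
-- built from base sum, with fallback (j + length, final total).
theorem pvLoop_eq (sizes : List Int) (i : Int) : ∀ (j sum : Int),
    pvLoopA sizes i j sum =
      pvScanB ((pvCumsB sizes sum).1.zip sizes) i j (j + (sizes.length : Int), (pvCumsB sizes sum).2) := by
  induction sizes with
  | nil => intro j sum; simp [pvLoopA, pvCumsB, pvScanB]
  | cons s rest ih =>
    intro j sum
    simp only [pvLoopA, pvCumsB, pvScanB, List.zip_cons_cons, List.length_cons]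
    by_cases h : i < sum + s
    · simp [h]
    · simp only [h, if_false]
      rw [ih (j + 1) (sum + s)]
      have harith : (j + 1) + ((rest.length : Nat) : Int) = j + ((rest.length + 1 : Nat) : Int) := by
        push_cast; ring
      rw [harith]

theorem locate_index_in_size_list_spec : Claim_equal_locate_index_in_size_list := by
  intro sizes i _
  unfold Spec_locate_index_in_size_list locate_index_in_size_list locate_index_in_size_list_alt
  rw [pvLoop_eq]
  norm_num
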